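-- pv_equiv track=rewrite | github.com/juanjomalouu/AlgoritmosParaJuegos | Juez3/masterChof.py | algoritmoVoraz
-- ===== SOURCE A (Python) =====
-- def algoritmoVoraz(candidatos, numAlimsSuper, tamanoCesta):
--     sol = []
--     alimentosCogidos = 0
--     sumaSol = 0
--     while candidatos != [] and alimentosCogidos < tamanoCesta:
--         seleccionado = candidatos[0]
--         sol.append(seleccionado)
--         sumaSol+=seleccionado[2]
--         alimentosCogidos += seleccionado[1]
--         candidatos.pop(0)
--     return sol,sumaSol
-- ===== SOURCE B (Python) =====
-- def algoritmoVoraz(candidatos, numAlimsSuper, tamanoCesta):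
--     # find cutoff index k: take elements while the running count is still below tamanoCesta
--     acc = 0
--     k = 0
--     for c in candidatos:
--         if acc >= tamanoCesta:
--             break
--         acc += c[1]
--         k += 1
--     sol = candidatos[:k]
--     sumaSol = sum(c[2] for c in sol)
--     del candidatos[:k]  # reproduce A's pops from the front
--     return sol, sumaSol
-- ===== Notes on version B (the rewrite author's own statement) =====
-- stated objective: alternative
-- what changed: A's single accumulating pop-loop that builds sol, sumaSol and alimentosCogidos together is replaced by an index-finding scan over counts to get the cutoff k, then a slice candidatos[:k] for sol, a separate sum over that slice, and one del candidatos[:k] for the mutation.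
-- outside the precondition, e.g. on algoritmoVoraz([[0, 5, 7], [1]], 0, 3): A returns ([[0, 5, 7]], 7), B returns ([[0, 5, 7]], 7)
import Mathlib
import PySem

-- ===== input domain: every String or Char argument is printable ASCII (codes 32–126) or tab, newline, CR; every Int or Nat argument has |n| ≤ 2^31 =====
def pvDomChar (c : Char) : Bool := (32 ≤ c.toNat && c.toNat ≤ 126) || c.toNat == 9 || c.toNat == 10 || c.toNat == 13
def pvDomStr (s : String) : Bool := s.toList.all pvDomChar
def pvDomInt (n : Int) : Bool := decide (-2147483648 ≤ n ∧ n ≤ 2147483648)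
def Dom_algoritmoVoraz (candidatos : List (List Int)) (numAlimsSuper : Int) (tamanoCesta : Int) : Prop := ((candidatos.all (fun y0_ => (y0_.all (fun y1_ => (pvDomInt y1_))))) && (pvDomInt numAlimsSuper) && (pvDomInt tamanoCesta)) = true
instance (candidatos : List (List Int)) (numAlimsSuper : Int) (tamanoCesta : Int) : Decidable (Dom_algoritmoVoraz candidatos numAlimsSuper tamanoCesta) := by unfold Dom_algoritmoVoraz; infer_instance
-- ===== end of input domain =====

-- B replaces A's single accumulating pop-loop by a cutoff-index scan plus a slice and a separate
-- sum (objective: alternative decomposition). A also mutates `candidatos` by popping the taken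
-- prefix; B reproduces this in Python with `del candidatos[:k]`; the equivalence proved here is
-- about the return value only.

-- ===== PORT A =====
-- A's while-loop: pops the head while the basket is not full, accumulating sol and sumaSol.
-- seleccionado[2] / seleccionado[1] are in range on every input admitted by Pre_ (lengths ≥ 3),
-- so the `.getD 0` fallback of the total indexing is never used there.
def pvALoop (candidatos : List (List Int)) (sol : List (List Int))
    (alimentosCogidos sumaSol tamanoCesta : Int) : List (List Int) × Int :=
  match candidatos with
  | [] => (sol, sumaSol)
  | seleccionado :: rest =>
    if alimentosCogidos < tamanoCesta then
      pvALoop rest (sol ++ [seleccionado])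
        (alimentosCogidos + (PySem.List.pyGet? seleccionado 1).getD 0)
        (sumaSol + (PySem.List.pyGet? seleccionado 2).getD 0) tamanoCesta
    else (sol, sumaSol)

def algoritmoVoraz (candidatos : List (List Int)) (numAlimsSuper : Int) (tamanoCesta : Int) : List (List Int) × Int :=
  pvALoop candidatos [] 0 0 tamanoCesta

-- ===== PORT B =====
-- B's cutoff scan: number of leading elements taken while the running count is below tamanoCesta.
def pvCutoff (candidatos : List (List Int)) (acc tamanoCesta : Int) : Nat :=
  match candidatos with
  | [] => 0
  | c :: rest =>
    if acc < tamanoCesta then pvCutoff rest (acc + (PySem.List.pyGet? c 1).getD 0) tamanoCesta + 1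
    else 0

def algoritmoVoraz_alt (candidatos : List (List Int)) (numAlimsSuper : Int) (tamanoCesta : Int) : List (List Int) × Int :=
  let k := pvCutoff candidatos 0 tamanoCesta
  let sol := candidatos.take k
  (sol, (sol.map (fun c => (PySem.List.pyGet? c 2).getD 0)).sum)

-- ===== PRECONDITION & SPEC =====
-- Pre_ excludes the inputs on which Python A raises IndexError (a taken element shorter than 3).
-- It slightly narrows: an element shorter than 3 that lies AFTER the basket fills is never
-- inspected by A, but Pre_ (with the tamanoCesta ≤ 0 disjunct aside) still excludes it.
def Pre_algoritmoVoraz (candidatos : List (List Int)) (numAlimsSuper : Int) (tamanoCesta : Int) : Prop :=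
  tamanoCesta ≤ 0 ∨ ∀ x ∈ candidatos, 3 ≤ x.length
instance (candidatos : List (List Int)) (numAlimsSuper : Int) (tamanoCesta : Int) : Decidable (Pre_algoritmoVoraz candidatos numAlimsSuper tamanoCesta) := by unfold Pre_algoritmoVoraz; infer_instance

def pvWitness_algoritmoVoraz : List (List Int) × Int × Int := ([[1, 2, 10], [2, 1, 5]], 0, 3)

def Spec_algoritmoVoraz (candidatos : List (List Int)) (numAlimsSuper : Int) (tamanoCesta : Int) (out : List (List Int) × Int) : Prop := out = algoritmoVoraz_alt candidatos numAlimsSuper tamanoCesta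
instance (candidatos : List (List Int)) (numAlimsSuper : Int) (tamanoCesta : Int) (out : List (List Int) × Int) : Decidable (Spec_algoritmoVoraz candidatos numAlimsSuper tamanoCesta out) := by unfold Spec_algoritmoVoraz; infer_instance

-- ===== CLAIM (what is proved, stated in full; the proofs are below) =====
def Claim_equal_algoritmoVoraz : Prop := ∀ (candidatos : List (List Int)) (numAlimsSuper : Int) (tamanoCesta : Int), Dom_algoritmoVoraz candidatos numAlimsSuper tamanoCesta → Pre_algoritmoVoraz candidatos numAlimsSuper tamanoCesta → Spec_algoritmoVoraz candidatos numAlimsSuper tamanoCesta (algoritmoVoraz candidatos numAlimsSuper tamanoCesta)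

-- ===== LEMMAS AND PROOFS =====

-- A's loop equals the prefix of length pvCutoff, appended to the accumulated sol,
-- with the sums accumulated accordingly.
theorem pvALoop_eq (candidatos : List (List Int)) :
    ∀ (sol : List (List Int)) (acc suma tamanoCesta : Int),
      pvALoop candidatos sol acc suma tamanoCesta =
        (sol ++ candidatos.take (pvCutoff candidatos acc tamanoCesta),
         suma + ((candidatos.take (pvCutoff candidatos acc tamanoCesta)).map
                   (fun c => (PySem.List.pyGet? c 2).getD 0)).sum) := by
  induction candidatos with
  | nil => intro sol acc suma t; simp [pvALoop, pvCutoff]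
  | cons c rest ih =>
    intro sol acc suma t
    by_cases h : acc < t
    · simp only [pvALoop, pvCutoff, if_pos h, ih]
      simp [add_assoc]
    · simp [pvALoop, pvCutoff, if_neg h]

-- ===== VERDICT (by name: the statement is the Claim_ definition above) =====
theorem algoritmoVoraz_spec : Claim_equal_algoritmoVoraz := by
  intro candidatos numAlimsSuper tamanoCesta _ _
  unfold Spec_algoritmoVoraz algoritmoVoraz algoritmoVoraz_alt
  simp [pvALoop_eq]
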